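-- pv_equiv track=rewrite | github.com/ibracken/NBA_Machine_Learning | lambda/minutes-projection/lambda_function.py | position_overlap_complex
-- ===== SOURCE A (Python) =====
-- def position_overlap_complex(pos1, pos2):
--     """
--     Complex position overlap: Adjacent positions can substitute
--     Used for: Complex Position Overlap model
--     """
--     position_groups = [
--         {'PG', 'SG'},      # Guards can swap
--         {'SG', 'SF'},      # Wings can swap
--         {'SF', 'PF'},      # Forwards can swap
--         {'PF', 'C'},       # Bigs can swap
--     ]
--
--     if pos1 == pos2:
--         return True
--
--     for group in position_groups:
--         if pos1 in group and pos2 in group: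
--             return True
--
--     return False
-- ===== SOURCE B (Python) =====
-- def position_overlap_complex(pos1, pos2):
--     """
--     Complex position overlap: Adjacent positions can substitute
--     Used for: Complex Position Overlap model
--     """
--     if pos1 == pos2:
--         return True
--     order = {'PG': 0, 'SG': 1, 'SF': 2, 'PF': 3, 'C': 4}
--     i = order.get(pos1)
--     j = order.get(pos2)
--     if i is None or j is None:
--         return False
--     return abs(i - j) <= 1
-- ===== Notes on version B (the rewrite author's own statement) =====
-- stated objective: idiomatic
-- what changed: Replaces the scan over four fixed adjacency sets with a single position-index dictionary lookup and an arithmetic adjacency test |i-j| <= 1.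
import Mathlib
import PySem

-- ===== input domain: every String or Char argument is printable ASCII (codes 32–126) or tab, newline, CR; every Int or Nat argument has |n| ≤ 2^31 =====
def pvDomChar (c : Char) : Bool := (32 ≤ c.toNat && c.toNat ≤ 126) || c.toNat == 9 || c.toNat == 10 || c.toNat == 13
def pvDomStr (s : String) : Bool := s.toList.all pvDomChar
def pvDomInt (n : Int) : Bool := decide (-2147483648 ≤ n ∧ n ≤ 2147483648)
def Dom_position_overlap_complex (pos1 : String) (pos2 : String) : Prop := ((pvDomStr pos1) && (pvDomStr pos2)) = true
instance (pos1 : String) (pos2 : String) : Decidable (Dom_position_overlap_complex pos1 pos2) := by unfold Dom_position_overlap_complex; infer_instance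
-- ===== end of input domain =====

-- B replaces A's scan over four fixed adjacency sets with an index-dictionary lookup
-- plus an arithmetic adjacency test (|i-j| <= 1); same return value on all inputs (idiomatic rewrite).


-- ===== PORT A =====
-- the loop 'for group in position_groups: if pos1 in group and pos2 in group: return True' / 'return False'
def pvGroupLoop (pos1 : String) (pos2 : String) : List (PySem.Set String) → Bool
  | [] => false
  | g :: rest =>
      if g.contains pos1 && g.contains pos2 then true
      else pvGroupLoop pos1 pos2 rest

def position_overlap_complex (pos1 : String) (pos2 : String) : Bool :=
  let position_groups : List (PySem.Set String) :=
    [PySem.Set.ofList ["PG", "SG"],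
     PySem.Set.ofList ["SG", "SF"],
     PySem.Set.ofList ["SF", "PF"],
     PySem.Set.ofList ["PF", "C"]]
  if pos1 == pos2 then true
  else pvGroupLoop pos1 pos2 position_groups

-- ===== PORT B =====
def position_overlap_complex_alt (pos1 : String) (pos2 : String) : Bool :=
  if pos1 == pos2 then true
  else
    let order : PySem.Dict String Int :=
      PySem.Dict.ofList [("PG", 0), ("SG", 1), ("SF", 2), ("PF", 3), ("C", 4)]
    match order.get? pos1, order.get? pos2 with
    | some i, some j => decide ((i - j).natAbs ≤ 1)
    | _, _ => false

-- ===== PRECONDITION & SPEC =====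
def Spec_position_overlap_complex (pos1 : String) (pos2 : String) (out : Bool) : Prop := out = position_overlap_complex_alt pos1 pos2
instance (pos1 : String) (pos2 : String) (out : Bool) : Decidable (Spec_position_overlap_complex pos1 pos2 out) := by unfold Spec_position_overlap_complex; infer_instance

-- ===== CLAIM (what is proved, stated in full; the proofs are below) =====
def Claim_equal_position_overlap_complex : Prop := ∀ (pos1 : String) (pos2 : String), Dom_position_overlap_complex pos1 pos2 → Spec_position_overlap_complex pos1 pos2 (position_overlap_complex pos1 pos2)

-- ===== LEMMAS AND PROOFS =====

-- every string is one of the five positions or none of them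
theorem pvFiveWay (s : String) :
    s = "PG" ∨ s = "SG" ∨ s = "SF" ∨ s = "PF" ∨ s = "C" ∨
    (s ≠ "PG" ∧ s ≠ "SG" ∧ s ≠ "SF" ∧ s ≠ "PF" ∧ s ≠ "C") := by
  by_cases h1 : s = "PG" <;> by_cases h2 : s = "SG" <;> by_cases h3 : s = "SF" <;>
    by_cases h4 : s = "PF" <;> by_cases h5 : s = "C" <;> tauto

-- ===== VERDICT (by name: the statement is the Claim_ definition above) =====
theorem position_overlap_complex_spec : Claim_equal_position_overlap_complex := by
  intro pos1 pos2 _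
  unfold Spec_position_overlap_complex position_overlap_complex position_overlap_complex_alt
  by_cases h : pos1 = pos2
  · simp [h]
  · rcases pvFiveWay pos1 with h1 | h1 | h1 | h1 | h1 | ⟨a1, b1, c1, d1, e1⟩ <;>
      rcases pvFiveWay pos2 with h2 | h2 | h2 | h2 | h2 | ⟨a2, b2, c2, d2, e2⟩ <;>
      simp_all [pvGroupLoop, PySem.Dict.ofList, PySem.Dict.update, PySem.Dict.get?_insert, PySem.Dict.get?_empty]
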